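-- pv_equiv track=rewrite | github.com/Brizmar/Algoritmos_IA_Enfoques | Grafos/011_HCS_BI.py | ascension_colinas
-- ===== SOURCE A (Python) =====
-- def funcion_evaluacion(estado):
--     # Ejemplo: función cuadrática para maximizar
--     return -(estado - 3) ** 2 + 10  # Pico en estado=3
--
-- def generar_vecinos(estado):
--     return [estado - 1, estado + 1]
--
-- def ascension_colinas(estado_inicial, iteraciones_max=100):
--     estado_actual = estado_inicial
--     for i in range(iteraciones_max):
--         vecinos = generar_vecinos(estado_actual)
--         mejor_vecino = max(vecinos, key=funcion_evaluacion)
--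
--         # Si el mejor vecino es mejor que el estado actual, moverse a él
--         if funcion_evaluacion(mejor_vecino) > funcion_evaluacion(estado_actual):
--             estado_actual = mejor_vecino
--         else:
--             # Hemos alcanzado un máximo local
--             break
--     return estado_actual
-- ===== SOURCE B (Python) =====
-- def ascension_colinas(estado_inicial, iteraciones_max=100):
--     # Closed form: A walks one unit toward the peak at 3 per iteration, so the
--     # result is estado_inicial moved min(max(iteraciones_max,0), |estado_inicial-3|)
--     # units toward 3.
--     pasos = min(max(iteraciones_max, 0), abs(estado_inicial - 3))
--     if estado_inicial < 3:
--         return estado_inicial + pasos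
--     return estado_inicial - pasos
-- ===== Notes on version B (the rewrite author's own statement) =====
-- stated objective: faster
-- what changed: B replaces A's one-unit-per-iteration hill-climbing loop by the closed form: move min(max(iteraciones_max,0), |estado_inicial-3|) units toward the peak at 3.
import Mathlib
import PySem

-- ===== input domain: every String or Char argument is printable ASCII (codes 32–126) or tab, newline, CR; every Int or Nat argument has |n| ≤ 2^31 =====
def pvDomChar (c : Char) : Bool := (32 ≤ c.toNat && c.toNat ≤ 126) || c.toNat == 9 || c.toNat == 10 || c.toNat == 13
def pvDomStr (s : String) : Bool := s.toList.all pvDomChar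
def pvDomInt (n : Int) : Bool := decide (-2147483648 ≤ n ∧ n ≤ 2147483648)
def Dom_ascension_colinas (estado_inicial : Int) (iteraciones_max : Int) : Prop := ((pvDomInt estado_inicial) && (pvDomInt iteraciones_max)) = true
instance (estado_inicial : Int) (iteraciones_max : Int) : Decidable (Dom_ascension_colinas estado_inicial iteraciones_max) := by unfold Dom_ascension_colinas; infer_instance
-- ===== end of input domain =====

-- B replaces A's one-step-per-iteration climb toward the peak at 3 by an O(1) closed form (asymptotically faster).


-- ===== PORT A =====
def funcion_evaluacion (estado : Int) : Int := -(estado - 3) ^ 2 + 10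

def generar_vecinos (estado : Int) : List Int := [estado - 1, estado + 1]

-- the `for i in range(iteraciones_max)` loop, fuel = remaining iterations; `break` = stop returning the state
def ascension_colinas_loop : Nat → Int → Int
  | 0, estado_actual => estado_actual
  | n + 1, estado_actual =>
    let vecinos := generar_vecinos estado_actual
    match PySem.List.max? vecinos funcion_evaluacion with
    | none => estado_actual   -- unreachable: vecinos is nonempty
    | some mejor_vecino =>
      if funcion_evaluacion mejor_vecino > funcion_evaluacion estado_actual then
        ascension_colinas_loop n mejor_vecino
      else
        estado_actual

def ascension_colinas (estado_inicial : Int) (iteraciones_max : Int) : Int :=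
  ascension_colinas_loop iteraciones_max.toNat estado_inicial

-- ===== PORT B =====
def ascension_colinas_alt (estado_inicial : Int) (iteraciones_max : Int) : Int :=
  let pasos := min (max iteraciones_max 0) |estado_inicial - 3|
  if estado_inicial < 3 then estado_inicial + pasos else estado_inicial - pasos

-- ===== PRECONDITION & SPEC =====
def Spec_ascension_colinas (estado_inicial : Int) (iteraciones_max : Int) (out : Int) : Prop := out = ascension_colinas_alt estado_inicial iteraciones_max
instance (estado_inicial : Int) (iteraciones_max : Int) (out : Int) : Decidable (Spec_ascension_colinas estado_inicial iteraciones_max out) := by unfold Spec_ascension_colinas; infer_instance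

-- ===== CLAIM (what is proved, stated in full; the proofs are below) =====
def Claim_equal_ascension_colinas : Prop := ∀ (estado_inicial : Int) (iteraciones_max : Int), Dom_ascension_colinas estado_inicial iteraciones_max → Spec_ascension_colinas estado_inicial iteraciones_max (ascension_colinas estado_inicial iteraciones_max)

-- ===== LEMMAS AND PROOFS =====

-- the pairwise differences of funcion_evaluacion at s-1, s, s+1 are linear in s
theorem fe_diff_left (s : Int) : funcion_evaluacion (s - 1) - funcion_evaluacion (s + 1) = 4 * s - 12 := by
  unfold funcion_evaluacion; ring

theorem fe_diff_leftstep (s : Int) : funcion_evaluacion (s - 1) - funcion_evaluacion s = 2 * s - 7 := by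
  unfold funcion_evaluacion; ring

theorem fe_diff_rightstep (s : Int) : funcion_evaluacion (s + 1) - funcion_evaluacion s = 5 - 2 * s := by
  unfold funcion_evaluacion; ring

-- closed form of A's loop: walk min(fuel, distance) units toward 3
theorem loop_closed (n : Nat) : ∀ s : Int,
    ascension_colinas_loop n s =
      if s < 3 then s + min (n : Int) (3 - s) else s - min (n : Int) (s - 3) := by
  induction n with
  | zero => intro s; simp only [ascension_colinas_loop]; split_ifs <;> omega
  | succ m ih =>
    intro s
    have h1 := fe_diff_left s
    have h2 := fe_diff_leftstep s
    have h3 := fe_diff_rightstep s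
    simp only [ascension_colinas_loop, generar_vecinos, PySem.List.max?, List.foldl]
    by_cases hlt : funcion_evaluacion (s - 1) < funcion_evaluacion (s + 1)
    · -- s < 3: mejor = s+1, and it is strictly better (since s ≤ 2)
      rw [if_pos hlt]
      have hs : s < 3 := by omega
      have hbetter : funcion_evaluacion s < funcion_evaluacion (s + 1) := by omega
      simp only [gt_iff_lt, if_pos hbetter, ih (s + 1)]
      have hm : (0 : Int) ≤ (m : Int) := Int.natCast_nonneg m
      push_cast
      split_ifs <;> omega
    · rw [if_neg hlt]
      have hs : 3 ≤ s := by omega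
      by_cases hbetter : funcion_evaluacion s < funcion_evaluacion (s - 1)
      · -- s > 3: move left
        simp only [gt_iff_lt, if_pos hbetter, ih (s - 1)]
        have hs4 : 4 ≤ s := by omega
        have hm : (0 : Int) ≤ (m : Int) := Int.natCast_nonneg m
        push_cast
        split_ifs <;> omega
      · -- s = 3: local maximum, break
        have hs3 : s = 3 := by omega
        simp only [gt_iff_lt, if_neg hbetter]
        subst hs3
        have hm : (0 : Int) ≤ (m : Int) := Int.natCast_nonneg m
        push_cast
        omega

-- ===== VERDICT (by name: the statement is the Claim_ definition above) =====
theorem ascension_colinas_spec : Claim_equal_ascension_colinas := by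
  intro s it _
  unfold Spec_ascension_colinas ascension_colinas ascension_colinas_alt
  rw [loop_closed]
  have hcast : ((it.toNat : Nat) : Int) = max it 0 := by omega
  rw [hcast]
  show (if s < 3 then s + min (max it 0) (3 - s) else s - min (max it 0) (s - 3)) =
    (let pasos := min (max it 0) |s - 3|;
     if s < 3 then s + pasos else s - pasos)
  simp only
  rcases abs_cases (s - 3) with ⟨ha, _⟩ | ⟨ha, _⟩ <;> rw [ha] <;> split_ifs <;> omega
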